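-- pv_equiv track=rewrite | github.com/shahbhavya7/Student_Navigator | backend-python/ml/cognitive_patterns.py | _extract_contextual_features
-- ===== SOURCE A (Python) =====
-- from typing import List, Dict, Tuple, Optional
-- from collections import defaultdict, deque
--
-- def _extract_contextual_features(events: List[Dict]) -> Dict:
--     """Extract contextual features from event metadata."""
--     # Count specific event types
--     event_type_counts = defaultdict(int)
--     for event in events:
--         event_type_counts[event.get('type', 'unknown')] += 1
--
--     return {
--         'navigation_count': event_type_counts.get('NAVIGATION', 0),
--         'click_count': event_type_counts.get('CLICK', 0),
--         'scroll_count': event_type_counts.get('SCROLL', 0),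
--         'typing_count': event_type_counts.get('TYPING_PATTERN', 0),
--         'idle_count': event_type_counts.get('IDLE', 0)
--     }
-- ===== SOURCE B (Python) =====
-- from typing import List, Dict
--
-- def _extract_contextual_features(events: List[Dict]) -> Dict:
--     """Extract contextual features: one independent filtered scan per returned count."""
--     return {
--         'navigation_count': sum(1 for e in events if e.get('type', 'unknown') == 'NAVIGATION'),
--         'click_count': sum(1 for e in events if e.get('type', 'unknown') == 'CLICK'),
--         'scroll_count': sum(1 for e in events if e.get('type', 'unknown') == 'SCROLL'),
--         'typing_count': sum(1 for e in events if e.get('type', 'unknown') == 'TYPING_PATTERN'),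
--         'idle_count': sum(1 for e in events if e.get('type', 'unknown') == 'IDLE'),
--     }
-- ===== Notes on version B (the rewrite author's own statement) =====
-- stated objective: alternative
-- what changed: B replaces A's single pass building a defaultdict counting table (then five key lookups) with five independent filtered linear scans, one generator expression per returned count; no counting structure is maintained.
import Mathlib
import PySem

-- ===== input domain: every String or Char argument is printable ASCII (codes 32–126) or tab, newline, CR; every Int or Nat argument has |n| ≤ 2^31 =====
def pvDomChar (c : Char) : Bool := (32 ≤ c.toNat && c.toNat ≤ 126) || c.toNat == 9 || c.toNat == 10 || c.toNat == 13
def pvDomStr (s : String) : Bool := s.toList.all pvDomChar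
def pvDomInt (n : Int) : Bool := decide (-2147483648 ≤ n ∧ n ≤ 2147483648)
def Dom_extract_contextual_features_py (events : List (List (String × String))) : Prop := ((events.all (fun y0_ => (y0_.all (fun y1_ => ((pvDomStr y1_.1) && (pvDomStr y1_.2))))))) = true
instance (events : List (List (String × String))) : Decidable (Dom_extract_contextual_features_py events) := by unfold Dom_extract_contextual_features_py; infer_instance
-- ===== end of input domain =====

-- B computes each of the five counts with its own filtered scan instead of A's single pass building a counting table; same return value, no speed claim.
-- ===== PORT A =====
def extract_contextual_features_py (events : List (List (String × String))) : List (String × Int) :=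
  let event_type_counts : PySem.Dict String Int :=
    events.foldl (fun d event => d.modify ((PySem.Dict.mk event).getD "type" "unknown") 0 (· + 1)) PySem.Dict.empty
  [("navigation_count", event_type_counts.getD "NAVIGATION" 0),
   ("click_count", event_type_counts.getD "CLICK" 0),
   ("scroll_count", event_type_counts.getD "SCROLL" 0),
   ("typing_count", event_type_counts.getD "TYPING_PATTERN" 0),
   ("idle_count", event_type_counts.getD "IDLE" 0)]

-- ===== PORT B =====
-- sum(1 for e in events if e.get('type','unknown') == k) ported as List.countP
def extract_contextual_features_py_alt (events : List (List (String × String))) : List (String × Int) :=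
  [("navigation_count", ((events.countP (fun e => (PySem.Dict.mk e).getD "type" "unknown" == "NAVIGATION")) : Int)),
   ("click_count", ((events.countP (fun e => (PySem.Dict.mk e).getD "type" "unknown" == "CLICK")) : Int)),
   ("scroll_count", ((events.countP (fun e => (PySem.Dict.mk e).getD "type" "unknown" == "SCROLL")) : Int)),
   ("typing_count", ((events.countP (fun e => (PySem.Dict.mk e).getD "type" "unknown" == "TYPING_PATTERN")) : Int)),
   ("idle_count", ((events.countP (fun e => (PySem.Dict.mk e).getD "type" "unknown" == "IDLE")) : Int))]

-- ===== PRECONDITION & SPEC =====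
def Spec_extract_contextual_features_py (events : List (List (String × String))) (out : List (String × Int)) : Prop := out = extract_contextual_features_py_alt events
instance (events : List (List (String × String))) (out : List (String × Int)) : Decidable (Spec_extract_contextual_features_py events out) := by unfold Spec_extract_contextual_features_py; infer_instance

-- ===== CLAIM (what is proved, stated in full; the proofs are below) =====
def Claim_equal_extract_contextual_features_py : Prop := ∀ (events : List (List (String × String))), Dom_extract_contextual_features_py events → Spec_extract_contextual_features_py events (extract_contextual_features_py events)

-- ===== LEMMAS AND PROOFS =====

-- ===== VERDICT (by name: the statement is the Claim_ definition above) =====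
theorem count_key (events : List (List (String × String))) (v : String) :
    (events.foldl (fun d event => d.modify ((PySem.Dict.mk event).getD "type" "unknown") 0 (· + 1)) PySem.Dict.empty).getD v 0
      = ((events.countP (fun e => (PySem.Dict.mk e).getD "type" "unknown" == v)) : Int) := by
  have h : (events.foldl (fun d event => d.modify ((PySem.Dict.mk event).getD "type" "unknown") 0 (· + 1)) (PySem.Dict.empty : PySem.Dict String Int)).getD v 0
      = ((events.map (fun e => (PySem.Dict.mk e).getD "type" "unknown")).foldl (fun d x => PySem.Dict.modify d x 0 (· + 1)) (PySem.Dict.empty : PySem.Dict String Int)).getD v 0 := by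
    rw [List.foldl_map]
  refine h.trans ?_
  rw [PySem.Dict.getD_foldl_modify_add_one]
  simp [List.count, List.countP_map, Function.comp_def]

theorem extract_contextual_features_py_spec : Claim_equal_extract_contextual_features_py := by
  intro events _
  unfold Spec_extract_contextual_features_py extract_contextual_features_py extract_contextual_features_py_alt
  simp only [count_key]
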